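-- pv_equiv track=rewrite | github.com/jobbvv/Busqueda_heuristica | funciones.py | contar_coincidencias
-- ===== SOURCE A (Python) =====
-- def contar_coincidencias(rutas_buses, ruta_coordenadas):
--     max_coincidencias_seguidas = 0
--     ruta_max_coincidencias_seguidas = None
--     coordenadas_max_coincidencias = []
--
--     for ruta, coordenadas_ruta in rutas_buses.items():
--         coincidencias_seguidas = 0
--         coordenadas_coincidencias_seguidas = []
--
--         for coordenada_ruta in coordenadas_ruta:
--             if coordenada_ruta in ruta_coordenadas:
--                 coincidencias_seguidas += 1
--                 coordenadas_coincidencias_seguidas.append(coordenada_ruta)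
--             else:
--                 if coincidencias_seguidas > max_coincidencias_seguidas:
--                     max_coincidencias_seguidas = coincidencias_seguidas
--                     ruta_max_coincidencias_seguidas = ruta
--                     coordenadas_max_coincidencias = coordenadas_coincidencias_seguidas
--                 coincidencias_seguidas = 0
--                 coordenadas_coincidencias_seguidas = []
--
--         # Verificar si las coincidencias seguidas al final de la ruta son las m치ximas
--         if coincidencias_seguidas > max_coincidencias_seguidas:
--             max_coincidencias_seguidas = coincidencias_seguidas
--             ruta_max_coincidencias_seguidas = ruta
--             coordenadas_max_coincidencias = coordenadas_coincidencias_seguidas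
--
--     # Eliminar las coordenadas de coordenadas_coincidencias_seguidas de ruta_coordenadas
--     for coordenada in coordenadas_max_coincidencias:
--         if coordenada in ruta_coordenadas:
--             ruta_coordenadas.remove(coordenada)
--
--     return ruta_max_coincidencias_seguidas, max_coincidencias_seguidas, coordenadas_max_coincidencias
-- ===== SOURCE B (Python) =====
-- def contar_coincidencias(rutas_buses, ruta_coordenadas):
--     best_ruta, best_len, best_run = None, 0, []
--
--     for ruta, coords in rutas_buses.items():
--         n = len(coords)
--         # backward DP: runlen[i] = length of the run of matching coords starting at i
--         runlen = [0] * (n + 1)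
--         for i in range(n - 1, -1, -1):
--             if coords[i] in ruta_coordenadas:
--                 runlen[i] = runlen[i + 1] + 1
--         # forward pass over run starts; the first strictly longer run wins
--         for i in range(n):
--             if runlen[i] > best_len and (i == 0 or runlen[i - 1] == 0):
--                 best_ruta, best_len, best_run = ruta, runlen[i], coords[i:i + runlen[i]]
--
--     for coordenada in best_run:
--         if coordenada in ruta_coordenadas:
--             ruta_coordenadas.remove(coordenada)
--
--     return best_ruta, best_len, best_run
-- ===== Notes on version B (the rewrite author's own statement) =====
-- stated objective: alternative
-- what changed: Replaces A's single forward pass with a running run counter/accumulator by two staged passes per route: a backward DP array runlen[i] of suffix run lengths, then a forward scan over run starts that takes the winning run as a slice coords[i:i+runlen[i]].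
import Mathlib
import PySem

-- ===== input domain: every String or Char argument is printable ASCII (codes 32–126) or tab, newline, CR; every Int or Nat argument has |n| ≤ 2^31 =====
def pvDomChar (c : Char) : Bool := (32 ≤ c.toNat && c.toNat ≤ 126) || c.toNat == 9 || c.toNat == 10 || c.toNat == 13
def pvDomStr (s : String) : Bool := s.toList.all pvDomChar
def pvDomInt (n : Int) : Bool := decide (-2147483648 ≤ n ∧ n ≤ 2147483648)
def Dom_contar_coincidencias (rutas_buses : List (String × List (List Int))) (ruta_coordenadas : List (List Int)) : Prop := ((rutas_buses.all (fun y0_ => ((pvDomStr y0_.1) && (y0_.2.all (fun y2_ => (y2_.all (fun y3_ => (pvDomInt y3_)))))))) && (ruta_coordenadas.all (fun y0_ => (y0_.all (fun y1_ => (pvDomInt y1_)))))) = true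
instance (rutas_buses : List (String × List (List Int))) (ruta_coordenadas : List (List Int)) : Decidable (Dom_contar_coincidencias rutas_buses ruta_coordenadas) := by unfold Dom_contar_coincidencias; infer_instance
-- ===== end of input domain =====

-- B replaces A's forward run counter by a backward DP array of suffix run lengths plus a forward
-- start-of-run selection scan (alternative decomposition, same cost); both Pythons also mutate
-- ruta_coordenadas identically; the equivalence proved here is about the return value.

-- ===== PORT A =====
-- inner-loop body of A: state is (ruta_max, max_seguidas, coords_max, seguidas, coords_seguidas)
def pvStepA (rc : List (List Int)) (ruta : String)
    (st : Option String × Int × List (List Int) × Int × List (List Int)) (co : List Int) :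
    Option String × Int × List (List Int) × Int × List (List Int) :=
  let (r, m, cmax, cs, ccs) := st
  if co ∈ rc then (r, m, cmax, cs + 1, ccs ++ [co])
  else if cs > m then (some ruta, cs, ccs, 0, [])
  else (r, m, cmax, 0, [])

-- outer-loop body of A: run the inner loop, then the end-of-route check
def pvRouteA (rc : List (List Int)) (st : Option String × Int × List (List Int))
    (p : String × List (List Int)) : Option String × Int × List (List Int) :=
  let (ruta, coords) := p
  let (r, m, cmax, cs, ccs) := coords.foldl (pvStepA rc ruta) (st.1, st.2.1, st.2.2, 0, [])
  if cs > m then (some ruta, cs, ccs) else (r, m, cmax)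

def contar_coincidencias (rutas_buses : List (String × List (List Int))) (ruta_coordenadas : List (List Int)) : Option String × Int × List (List Int) :=
  rutas_buses.foldl (pvRouteA ruta_coordenadas) (none, 0, [])

-- ===== PORT B =====
-- Source B's backward loop 'for i in range(n-1,-1,-1): runlen[i] = runlen[i+1]+1 if match else 0'
-- transcribed as the right-to-left recursion it is: runlen[i+1] is the head of the part built so far
def pvRunlen (rc : List (List Int)) : List (List Int) → List Nat
  | [] => [0]
  | c :: cs =>
    let r := pvRunlen rc cs
    (if c ∈ rc then r.getD 0 0 + 1 else 0) :: r

-- Source B's per-route body: build runlen, then the forward scan over range(n);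
-- coords[i:i+runlen[i]] is a nonnegative in-range slice, i.e. (drop i).take runlen[i]
def pvRouteB (rc : List (List Int)) (st : Option String × Int × List (List Int))
    (p : String × List (List Int)) : Option String × Int × List (List Int) :=
  let (ruta, coords) := p
  let rl := pvRunlen rc coords
  (List.range coords.length).foldl
    (fun best i =>
      if ((rl.getD i 0 : Int) > best.2.1 ∧ (i = 0 ∨ rl.getD (i - 1) 0 = 0))
      then (some ruta, (rl.getD i 0 : Int), (coords.drop i).take (rl.getD i 0))
      else best) st

def contar_coincidencias_alt (rutas_buses : List (String × List (List Int))) (ruta_coordenadas : List (List Int)) : Option String × Int × List (List Int) :=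
  rutas_buses.foldl (pvRouteB ruta_coordenadas) (none, 0, [])

-- ===== PRECONDITION & SPEC =====
def Spec_contar_coincidencias (rutas_buses : List (String × List (List Int))) (ruta_coordenadas : List (List Int)) (out : Option String × Int × List (List Int)) : Prop := out = contar_coincidencias_alt rutas_buses ruta_coordenadas
instance (rutas_buses : List (String × List (List Int))) (ruta_coordenadas : List (List Int)) (out : Option String × Int × List (List Int)) : Decidable (Spec_contar_coincidencias rutas_buses ruta_coordenadas out) := by unfold Spec_contar_coincidencias; infer_instance

-- ===== CLAIM (what is proved, stated in full; the proofs are below) =====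
def Claim_equal_contar_coincidencias : Prop := ∀ (rutas_buses : List (String × List (List Int))) (ruta_coordenadas : List (List Int)), Dom_contar_coincidencias rutas_buses ruta_coordenadas → Spec_contar_coincidencias rutas_buses ruta_coordenadas (contar_coincidencias rutas_buses ruta_coordenadas)

-- ===== LEMMAS AND PROOFS =====

-- proof helper: the sequence of maximal runs of coords with constant membership in rc
def pvGroupby (rc : List (List Int)) : List (List Int) → List (Bool × List (List Int))
  | [] => []
  | c :: cs =>
    let k := decide (c ∈ rc)
    let run := cs.takeWhile (fun c' => decide (c' ∈ rc) == k)
    let rest := cs.dropWhile (fun c' => decide (c' ∈ rc) == k)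
    (k, c :: run) :: pvGroupby rc rest
termination_by l => l.length
decreasing_by
  simpa using Nat.lt_succ_of_le (List.length_dropWhile_le _ _)

-- the common specification both per-route bodies reach: fold the strict-> best-update over the runs
def pvGStep (ruta : String) (best : Option String × Int × List (List Int))
    (g : Bool × List (List Int)) : Option String × Int × List (List Int) :=
  if g.1 then
    if (g.2.length : Int) > best.2.1 then (some ruta, (g.2.length : Int), g.2) else best
  else best

-- A's end-of-route check, as a named function of the inner-loop state (proof helper)
def pvFinish (ruta : String) (st : Option String × Int × List (List Int) × Int × List (List Int)) :
    Option String × Int × List (List Int) :=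
  if st.2.2.2.1 > st.2.1 then (some ruta, st.2.2.2.1, st.2.2.2.2) else (st.1, st.2.1, st.2.2.1)

-- all-member run: the inner loop of A just counts and accumulates
theorem pvFoldA_members (rc : List (List Int)) (ruta : String) :
    ∀ (run : List (List Int)), (∀ c ∈ run, c ∈ rc) →
    ∀ r m cmax (cs : Int) ccs,
    run.foldl (pvStepA rc ruta) (r, m, cmax, cs, ccs) =
      (r, m, cmax, cs + (run.length : Int), ccs ++ run) := by
  intro run
  induction run with
  | nil => intro _ r m cmax cs ccs; simp
  | cons c t ih =>
    intro h r m cmax cs ccs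
    have hc : c ∈ rc := h c (by simp)
    simp only [List.foldl_cons, pvStepA, if_pos hc]
    rw [ih (fun x hx => h x (by simp [hx]))]
    have h1 : ccs ++ [c] ++ t = ccs ++ c :: t := by simp
    have h2 : cs + 1 + (t.length : Int) = cs + ((c :: t).length : Int) := by
      simp only [List.length_cons]; push_cast; ring
    rw [h1, h2]

-- all-nonmember run with zero pending counter: the inner loop of A is a no-op
theorem pvFoldA_nonmembers (rc : List (List Int)) (ruta : String) :
    ∀ (run : List (List Int)), (∀ c ∈ run, c ∉ rc) →
    ∀ r (m : Int) cmax, 0 ≤ m →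
    run.foldl (pvStepA rc ruta) (r, m, cmax, 0, []) = (r, m, cmax, 0, []) := by
  intro run
  induction run with
  | nil => intro _ r m cmax _; simp
  | cons c t ih =>
    intro h r m cmax hm
    have hc : c ∉ rc := h c (by simp)
    have hng : ¬ ((0 : Int) > m) := by omega
    simp only [List.foldl_cons, pvStepA, if_neg hc, if_neg hng]
    exact ih (fun x hx => h x (by simp [hx])) r m cmax hm

-- head of a dropWhile fails the predicate
theorem pvDropWhile_head {α : Type} (p : α → Bool) :
    ∀ (l : List α) (d : α) (t : List α), l.dropWhile p = d :: t → p d = false := by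
  intro l
  induction l with
  | nil => intro d t h; simp at h
  | cons a as ih =>
    intro d t h
    by_cases ha : p a = true
    · rw [List.dropWhile_cons_of_pos ha] at h
      exact ih d t h
    · rw [List.dropWhile_cons_of_neg ha] at h
      cases h
      simpa using ha

-- closing a pending run: running the rest of the inner loop after a pending run
-- (cs, ccs) and then the end-of-route check equals first folding the best-update
-- into the triple and restarting with an empty pending run
theorem pvCloseRun (rc : List (List Int)) (ruta : String)
    (rest : List (List Int)) (hrest : ∀ d t, rest = d :: t → d ∉ rc)
    (r : Option String) (m : Int) (cmax : List (List Int)) (cs : Int) (ccs : List (List Int))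
    (hcs : 0 ≤ cs) (hm : 0 ≤ m) :
    pvFinish ruta
      (rest.foldl (pvStepA rc ruta) (r, m, cmax, cs, ccs)) =
    pvFinish ruta
      (rest.foldl (pvStepA rc ruta)
        (if cs > m then (some ruta, cs, ccs, 0, []) else (r, m, cmax, 0, []))) := by
  cases rest with
  | nil =>
    simp only [List.foldl_nil, pvFinish]
    by_cases h : cs > m
    · rw [if_pos h]
      have : ¬ ((0:Int) > cs) := by omega
      simp [h, this]
    · rw [if_neg h]
      have : ¬ ((0:Int) > m) := by omega
      simp [h, this]
  | cons d t =>
    have hd : d ∉ rc := hrest d t rfl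
    simp only [List.foldl_cons, pvStepA, if_neg hd, pvFinish]
    by_cases h : cs > m
    · have h0 : ¬ ((0:Int) > cs) := by omega
      simp [h, h0]
    · have h0 : ¬ ((0:Int) > m) := by omega
      simp [h, h0]

-- A side: A's inner loop + final check = fold of the best-update over the maximal runs
theorem pvInnerEq (rc : List (List Int)) (ruta : String) :
    ∀ (coords : List (List Int)) (r : Option String) (m : Int) (cmax : List (List Int)),
    0 ≤ m →
    pvFinish ruta
      (coords.foldl (pvStepA rc ruta) (r, m, cmax, 0, [])) =
    (pvGroupby rc coords).foldl (pvGStep ruta) (r, m, cmax)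
  | [], r, m, cmax, hm => by
    have : ¬ ((0:Int) > m) := by omega
    simp [pvGroupby, pvFinish, this]
  | c :: cs, r, m, cmax, hm => by
    by_cases hc : c ∈ rc
    · have hk : decide (c ∈ rc) = true := by simpa using hc
      rw [pvGroupby]
      simp only [hk]
      set p : List Int → Bool := fun c' => decide (c' ∈ rc) == true with hp
      set run := cs.takeWhile p with hrun
      set rest := cs.dropWhile p with hrest
      have hsplit : cs = run ++ rest := (List.takeWhile_append_dropWhile).symm
      have hmemrun : ∀ x ∈ run, x ∈ rc := by
        intro x hx
        have := List.mem_takeWhile_imp hx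
        simpa [hp] using this
      have hresthead : ∀ d t, rest = d :: t → d ∉ rc := by
        intro d t hdt
        have := pvDropWhile_head p cs d t (hrest ▸ hdt)
        simpa [hp] using this
      have hfold :
          (c :: cs).foldl (pvStepA rc ruta) (r, m, cmax, 0, []) =
          rest.foldl (pvStepA rc ruta) (r, m, cmax, 1 + (run.length : Int), c :: run) := by
        rw [hsplit]
        simp only [List.foldl_cons, List.foldl_append, pvStepA, if_pos hc]
        rw [pvFoldA_members rc ruta run hmemrun]
        norm_num
      rw [hfold]
      rw [pvCloseRun rc ruta rest hresthead r m cmax (1 + (run.length : Int)) (c :: run)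
        (by positivity) hm]
      have hlen : ((c :: run).length : Int) = 1 + (run.length : Int) := by
        simp; ring
      by_cases hgt : 1 + (run.length : Int) > m
      · rw [if_pos hgt]
        rw [pvInnerEq rc ruta rest (some ruta) (1 + (run.length : Int)) (c :: run) (by positivity)]
        simp only [List.foldl_cons]
        congr 1
        rw [pvGStep]
        simp only
        rw [hlen]
        simp [hgt]
      · rw [if_neg hgt]
        rw [pvInnerEq rc ruta rest r m cmax hm]
        simp only [List.foldl_cons]
        congr 1
        rw [pvGStep]
        simp only
        rw [hlen]
        simp [hgt]
    · have hk : decide (c ∈ rc) = false := by simpa using hc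
      rw [pvGroupby]
      simp only [hk]
      set p : List Int → Bool := fun c' => decide (c' ∈ rc) == false with hp
      set run := cs.takeWhile p with hrun
      set rest := cs.dropWhile p with hrest
      have hsplit : cs = run ++ rest := (List.takeWhile_append_dropWhile).symm
      have hmemrun : ∀ x ∈ run, x ∉ rc := by
        intro x hx
        have := List.mem_takeWhile_imp hx
        simpa [hp] using this
      have hng : ¬ ((0:Int) > m) := by omega
      have hfold :
          (c :: cs).foldl (pvStepA rc ruta) (r, m, cmax, 0, []) =
          rest.foldl (pvStepA rc ruta) (r, m, cmax, 0, []) := by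
        rw [hsplit]
        simp only [List.foldl_cons, List.foldl_append, pvStepA, if_neg hc, if_neg hng]
        rw [pvFoldA_nonmembers rc ruta run hmemrun r m cmax hm]
      rw [hfold, pvInnerEq rc ruta rest r m cmax hm]
      simp [pvGStep]
termination_by coords => coords.length
decreasing_by
  all_goals simpa [hrest] using Nat.lt_succ_of_le (List.length_dropWhile_le _ _)

-- run length starting at position i (mathematical form of B's runlen array)
def pvL (rc : List (List Int)) (coords : List (List Int)) (i : Nat) : Nat :=
  ((coords.drop i).takeWhile (fun c => decide (c ∈ rc))).length

-- B's scan step, with the runlen array replaced by pvL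
def pvMStep (rc : List (List Int)) (ruta : String) (coords : List (List Int))
    (best : Option String × Int × List (List Int)) (i : Nat) :
    Option String × Int × List (List Int) :=
  if ((pvL rc coords i : Int) > best.2.1 ∧ (i = 0 ∨ pvL rc coords (i - 1) = 0))
  then (some ruta, (pvL rc coords i : Int), (coords.drop i).take (pvL rc coords i))
  else best

-- the runlen array entries are the suffix run lengths
theorem pvRunlen_getD (rc : List (List Int)) :
    ∀ (coords : List (List Int)) (i : Nat), i ≤ coords.length →
    (pvRunlen rc coords).getD i 0 = pvL rc coords i := by
  intro coords
  induction coords with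
  | nil =>
    intro i hi
    have : i = 0 := Nat.le_zero.mp hi
    subst this
    simp [pvRunlen, pvL]
  | cons c cs ih =>
    intro i hi
    cases i with
    | zero =>
      by_cases hc : c ∈ rc
      · have h0 := ih 0 (by omega)
        simp only [pvRunlen, List.getD_cons_zero, if_pos hc, pvL, List.drop_zero] at *
        rw [h0]
        simp [hc]
      · simp [pvRunlen, pvL, hc]
    | succ j =>
      have := ih j (by simpa using hi)
      simpa [pvRunlen, pvL] using this

-- generic fold lemmas used below
theorem pvFoldl_congr_inv {α β : Type} (P : β → Prop) :
    ∀ (l : List α) (f g : β → α → β) (b : β), P b →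
    (∀ x ∈ l, ∀ b, P b → f b x = g b x ∧ P (f b x)) →
    l.foldl f b = l.foldl g b := by
  intro l
  induction l with
  | nil => intro f g b _ _; rfl
  | cons a t ih =>
    intro f g b hb h
    have ha := h a (by simp) b hb
    simp only [List.foldl_cons]
    rw [← ha.1]
    exact ih f g (f b a) ha.2 (fun x hx => h x (by simp [hx]))

theorem pvFoldl_id_inv {α β : Type} (P : β → Prop) :
    ∀ (l : List α) (f : β → α → β) (b : β), P b →
    (∀ x ∈ l, ∀ b, P b → f b x = b) →
    l.foldl f b = b := by
  intro l
  induction l with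
  | nil => intro f b _ _; rfl
  | cons a t ih =>
    intro f b hb h
    simp only [List.foldl_cons, h a (by simp) b hb]
    exact ih f b hb (fun x hx => h x (by simp [hx]))

-- pvMStep preserves nonnegativity of the best length
theorem pvMStep_nonneg (rc : List (List Int)) (ruta : String) (coords : List (List Int))
    (best : Option String × Int × List (List Int)) (i : Nat) (h : 0 ≤ best.2.1) :
    0 ≤ (pvMStep rc ruta coords best i).2.1 := by
  unfold pvMStep
  split_ifs with hcond
  · positivity
  · exact h

-- takeWhile over an all-true prefix
theorem pvTakeWhile_all_append {α : Type} (p : α → Bool) :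
    ∀ (l₁ l₂ : List α), (∀ x ∈ l₁, p x = true) →
    (l₁ ++ l₂).takeWhile p = l₁ ++ l₂.takeWhile p := by
  intro l₁
  induction l₁ with
  | nil => intro l₂ _; simp
  | cons a t ih =>
    intro l₂ h
    have ha : p a = true := h a (by simp)
    simp only [List.cons_append, List.takeWhile_cons_of_pos ha]
    rw [ih l₂ (fun x hx => h x (by simp [hx]))]

-- shifted scan steps coincide beyond the first index of the tail
theorem pvMStep_shift (rc : List (List Int)) (ruta : String)
    (coords rest : List (List Int)) (m' : Nat) (hm' : 1 ≤ m')
    (hL : ∀ i, pvL rc coords (m' + i) = pvL rc rest i)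
    (hd : ∀ i, coords.drop (m' + i) = rest.drop i)
    (j : Nat) (b : Option String × Int × List (List Int)) :
    pvMStep rc ruta coords b (m' + (j + 1)) = pvMStep rc ruta rest b (j + 1) := by
  unfold pvMStep
  have h1 : pvL rc coords (m' + (j + 1)) = pvL rc rest (j + 1) := hL (j + 1)
  have h2 : pvL rc coords (m' + (j + 1) - 1) = pvL rc rest (j + 1 - 1) := by
    have := hL j
    have e1 : m' + (j + 1) - 1 = m' + j := by omega
    simpa [e1] using this
  have h3 : coords.drop (m' + (j + 1)) = rest.drop (j + 1) := hd (j + 1)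
  rw [h1, h2, h3]
  have h4 : (m' + (j + 1) = 0 ∨ pvL rc rest (j + 1 - 1) = 0) ↔
      (j + 1 = 0 ∨ pvL rc rest (j + 1 - 1) = 0) := by
    constructor <;> intro h <;> rcases h with h | h
    · omega
    · exact Or.inr h
    · omega
    · exact Or.inr h
  simp only [h4]

-- B side: the scan over indices = fold of the best-update over the maximal runs
theorem pvScanEq (rc : List (List Int)) (ruta : String) :
    ∀ (coords : List (List Int)) (st : Option String × Int × List (List Int)),
    0 ≤ st.2.1 →
    (List.range coords.length).foldl (pvMStep rc ruta coords) st =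
    (pvGroupby rc coords).foldl (pvGStep ruta) st
  | [], st, hst => by simp [pvGroupby]
  | c :: cs, st, hst => by
    set q : List Int → Bool := fun c' => decide (c' ∈ rc) with hq
    by_cases hc : c ∈ rc
    · -- c ∈ rc : first group is a member run
      have hk : decide (c ∈ rc) = true := by simpa using hc
      rw [pvGroupby]
      simp only [hk]
      set run := cs.takeWhile (fun c' => decide (c' ∈ rc) == true) with hrun
      set rest := cs.dropWhile (fun c' => decide (c' ∈ rc) == true) with hrest
      have hsplit : c :: cs = (c :: run) ++ rest := by
        simp only [List.cons_append, List.cons.injEq, true_and]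
        exact (List.takeWhile_append_dropWhile).symm
      set g0 : List (List Int) := c :: run with hg0
      set m' := g0.length with hm'
      have hm'pos : 1 ≤ m' := by rw [hm', hg0]; simp
      have hmemg0 : ∀ x ∈ g0, q x = true := by
        intro x hx
        rcases List.mem_cons.mp hx with h | h
        · simp [hq, h ▸ hc]
        · have := List.mem_takeWhile_imp h
          simpa [hq] using this
      have hresthead : ∀ d t, rest = d :: t → q d = false := by
        intro d t hdt
        have := pvDropWhile_head _ cs d t (hrest ▸ hdt)
        simpa [hq] using this
      have htwrest : rest.takeWhile q = [] := by
        cases hr : rest with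
        | nil => simp
        | cons d t => rw [List.takeWhile_cons_of_neg (by simp [hresthead d t hr])]
      have hdrop : ∀ i, i ≤ m' → (g0 ++ rest).drop i = g0.drop i ++ rest := by
        intro i hi
        rw [List.drop_append_of_le_length (by omega)]
      have hLlt : ∀ i, i < m' → pvL rc (g0 ++ rest) i = m' - i := by
        intro i hi
        unfold pvL
        rw [hdrop i (by omega), pvTakeWhile_all_append _ _ _
          (fun x hx => hmemg0 x (List.mem_of_mem_drop hx)), htwrest]
        simp [List.length_drop, hm']
      have hLshift : ∀ i, pvL rc (c :: cs) (m' + i) = pvL rc rest i := by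
        intro i
        rw [hsplit]
        unfold pvL
        congr 1
        rw [← List.drop_drop]
        congr 1
        simp [hm']
      have hdropshift : ∀ i, (c :: cs).drop (m' + i) = rest.drop i := by
        intro i
        rw [hsplit, ← List.drop_drop]
        congr 1
        simp [hm']
      have hlen : (c :: cs).length = m' + rest.length := by
        rw [hsplit]; simp [hm']
      rw [hlen, List.range_add, List.foldl_append]
      -- the first m' indices perform exactly the best-update for g0
      have hfirst : (List.range m').foldl (pvMStep rc ruta (c :: cs)) st =
          pvGStep ruta st (true, g0) := by
        obtain ⟨k, hk2⟩ : ∃ k, m' = k + 1 := ⟨m' - 1, by omega⟩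
        rw [hk2, List.range_succ_eq_map, List.foldl_cons]
        have hstep0 : pvMStep rc ruta (c :: cs) st 0 = pvGStep ruta st (true, g0) := by
          unfold pvMStep pvGStep
          have hL0 : pvL rc (c :: cs) 0 = m' := by
            have := hLlt 0 (by omega)
            rw [← hsplit] at this
            simpa using this
          have htake : (c :: cs).take m' = g0 := by
            conv_lhs => rw [hsplit]
            exact List.take_left
          simp only [hL0, List.drop_zero, htake]
          rw [← hm']
          by_cases hgt : (m' : Int) > st.2.1
          · rw [if_pos ⟨hgt, Or.inl trivial⟩]
            simp [hgt]
          · rw [if_neg (fun h => hgt h.1)]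
            simp [hgt]
        rw [hstep0]
        apply pvFoldl_id_inv (fun _ => True) _ _ _ trivial
        intro x hx b _
        obtain ⟨j, hj, rfl⟩ := List.mem_map.mp hx
        have hjk : j < k := List.mem_range.mp hj
        unfold pvMStep
        have hLj : pvL rc (c :: cs) j ≠ 0 := by
          have := hLlt j (by omega)
          rw [← hsplit] at this
          omega
        have hnc : ¬ ((j + 1 = 0) ∨ pvL rc (c :: cs) (j + 1 - 1) = 0) := by
          simp [hLj]
        rw [if_neg (by tauto)]
      rw [hfirst]
      have hnn1 : 0 ≤ (pvGStep ruta st (true, g0)).2.1 := by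
        by_cases hgt : ((g0.length : Int) > st.2.1)
        · have h0 : (0 : Int) ≤ (g0.length : Int) := by positivity
          simp [pvGStep, hgt]
        · simpa [pvGStep, hgt] using hst
      rw [List.foldl_map]
      rw [pvFoldl_congr_inv (fun b => 0 ≤ b.2.1) _ _ (pvMStep rc ruta rest) _ hnn1 ?_]
      · exact pvScanEq rc ruta rest (pvGStep ruta st (true, g0)) hnn1
      · intro i hi b hb
        refine ⟨?_, pvMStep_nonneg rc ruta (c :: cs) b (m' + i) hb⟩
        cases i with
        | zero =>
          unfold pvMStep
          have h2 : pvL rc rest 0 = 0 := by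
            have ht : rest.takeWhile (fun c' => decide (c' ∈ rc)) = [] := htwrest
            unfold pvL
            rw [List.drop_zero, ht]
            rfl
          have h1 : pvL rc (c :: cs) (m' + 0) = 0 := by rw [hLshift 0, h2]
          have hng : ¬ ((pvL rc (c :: cs) (m' + 0) : Int) > b.2.1) := by
            rw [h1]; push_cast; omega
          have hng' : ¬ ((pvL rc rest 0 : Int) > b.2.1) := by
            rw [h2]; push_cast; omega
          rw [if_neg (by tauto), if_neg (by tauto)]
        | succ j =>
          exact pvMStep_shift rc ruta (c :: cs) rest m' hm'pos hLshift hdropshift j b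
    · -- c ∉ rc : first group is a nonmember run, skipped on both sides
      have hk : decide (c ∈ rc) = false := by simpa using hc
      rw [pvGroupby]
      simp only [hk]
      set run := cs.takeWhile (fun c' => decide (c' ∈ rc) == false) with hrun
      set rest := cs.dropWhile (fun c' => decide (c' ∈ rc) == false) with hrest
      have hsplit : c :: cs = (c :: run) ++ rest := by
        simp only [List.cons_append, List.cons.injEq, true_and]
        exact (List.takeWhile_append_dropWhile).symm
      set g0 : List (List Int) := c :: run with hg0
      set m' := g0.length with hm'
      have hm'pos : 1 ≤ m' := by rw [hm', hg0]; simp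
      have hmemg0 : ∀ x ∈ g0, q x = false := by
        intro x hx
        rcases List.mem_cons.mp hx with h | h
        · simp [hq, h ▸ hc]
        · have := List.mem_takeWhile_imp h
          simpa [hq] using this
      have hL0 : ∀ i, i < m' → pvL rc (c :: cs) i = 0 := by
        intro i hi
        rw [hsplit]
        unfold pvL
        rw [List.drop_append_of_le_length (by omega)]
        obtain ⟨d, t, hdt⟩ : ∃ d t, g0.drop i = d :: t := by
          cases hgd : g0.drop i with
          | nil => exfalso; have := List.drop_eq_nil_iff.mp hgd; omega
          | cons d t => exact ⟨d, t, rfl⟩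
        rw [hdt]
        have hd : q d = false :=
          hmemg0 d (List.mem_of_mem_drop (hdt ▸ (List.mem_cons_self)))
        simp only [List.cons_append]
        rw [List.takeWhile_cons_of_neg (by simpa [hq] using hd)]
        rfl
      have hLshift : ∀ i, pvL rc (c :: cs) (m' + i) = pvL rc rest i := by
        intro i
        rw [hsplit]
        unfold pvL
        congr 1
        rw [← List.drop_drop]
        congr 1
        simp [hm']
      have hdropshift : ∀ i, (c :: cs).drop (m' + i) = rest.drop i := by
        intro i
        rw [hsplit, ← List.drop_drop]
        congr 1
        simp [hm']
      have hlen : (c :: cs).length = m' + rest.length := by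
        rw [hsplit]; simp [hm']
      rw [hlen, List.range_add, List.foldl_append]
      -- the first m' indices are a no-op
      have hfirst : (List.range m').foldl (pvMStep rc ruta (c :: cs)) st = st := by
        apply pvFoldl_id_inv (fun b => 0 ≤ b.2.1) _ _ _ hst
        intro i hi b hb
        have him : i < m' := List.mem_range.mp hi
        unfold pvMStep
        have hcond : ¬ (((pvL rc (c :: cs) i : Int) > b.2.1) ∧
            (i = 0 ∨ pvL rc (c :: cs) (i - 1) = 0)) := by
          intro hcond
          have := hcond.1
          rw [hL0 i him] at this
          push_cast at this
          omega
        rw [if_neg hcond]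
      rw [hfirst]
      rw [List.foldl_map]
      rw [pvFoldl_congr_inv (fun b => 0 ≤ b.2.1) _ _ (pvMStep rc ruta rest) _ hst ?_]
      · rw [pvScanEq rc ruta rest st hst]
        simp only [List.foldl_cons]
        congr 1
      · intro i hi b hb
        refine ⟨?_, pvMStep_nonneg rc ruta (c :: cs) b (m' + i) hb⟩
        cases i with
        | zero =>
          unfold pvMStep
          have h1 : pvL rc (c :: cs) (m' + 0) = pvL rc rest 0 := hLshift 0
          have h3 : (c :: cs).drop (m' + 0) = rest.drop 0 := hdropshift 0
          have h2 : pvL rc (c :: cs) (m' + 0 - 1) = 0 := by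
            have := hL0 (m' - 1) (by omega)
            have e : m' + 0 - 1 = m' - 1 := by omega
            rw [e, this]
          rw [h1, h3, h2]
          simp
        | succ j =>
          exact pvMStep_shift rc ruta (c :: cs) rest m' hm'pos hLshift hdropshift j b
termination_by coords => coords.length
decreasing_by
  all_goals simpa [hrest] using Nat.lt_succ_of_le (List.length_dropWhile_le _ _)

-- a fold preserves an invariant its step preserves
theorem pvFoldl_pres {α β : Type} (P : β → Prop) :
    ∀ (l : List α) (f : β → α → β) (b : β), P b →
    (∀ b x, P b → P (f b x)) → P (l.foldl f b) := by
  intro l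
  induction l with
  | nil => intro f b hb _; exact hb
  | cons a t ih =>
    intro f b hb h
    exact ih f (f b a) (h b a hb) h

-- per-route equality (given a nonnegative running maximum)
theorem pvRoute_eq (rc : List (List Int)) (st : Option String × Int × List (List Int))
    (p : String × List (List Int)) (hm : 0 ≤ st.2.1) :
    pvRouteA rc st p = pvRouteB rc st p := by
  obtain ⟨ruta, coords⟩ := p
  obtain ⟨r, m, cmax⟩ := st
  have hcongr :
      (List.range coords.length).foldl
        (fun best i =>
          if (((pvRunlen rc coords).getD i 0 : Int) > best.2.1 ∧
              (i = 0 ∨ (pvRunlen rc coords).getD (i - 1) 0 = 0))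
          then (some ruta, ((pvRunlen rc coords).getD i 0 : Int),
                (coords.drop i).take ((pvRunlen rc coords).getD i 0))
          else best) (r, m, cmax) =
      (List.range coords.length).foldl (pvMStep rc ruta coords) (r, m, cmax) := by
    apply pvFoldl_congr_inv (fun _ => True) _ _ _ _ trivial
    intro i hi b _
    refine ⟨?_, trivial⟩
    have hib : i < coords.length := List.mem_range.mp hi
    rw [pvRunlen_getD rc coords i (by omega), pvRunlen_getD rc coords (i - 1) (by omega)]
    rfl
  have hA := pvInnerEq rc ruta coords r m cmax hm
  have hB := pvScanEq rc ruta coords (r, m, cmax) hm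
  have : pvFinish ruta (coords.foldl (pvStepA rc ruta) (r, m, cmax, 0, [])) =
      (List.range coords.length).foldl (pvMStep rc ruta coords) (r, m, cmax) :=
    hA.trans hB.symm
  simp only [pvRouteB]
  rw [hcongr, ← this]
  simp [pvRouteA, pvFinish]

-- B's per-route body keeps the running maximum nonnegative
theorem pvRouteB_nonneg (rc : List (List Int)) (st : Option String × Int × List (List Int))
    (p : String × List (List Int)) (hm : 0 ≤ st.2.1) : 0 ≤ (pvRouteB rc st p).2.1 := by
  obtain ⟨ruta, coords⟩ := p
  simp only [pvRouteB]
  refine pvFoldl_pres (fun (b : Option String × Int × List (List Int)) => 0 ≤ b.2.1) _ _ _ hm ?_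
  intro b i hb
  split_ifs with h
  · positivity
  · exact hb

-- fold the per-route equality over all routes
theorem pvOuter_eq (rc : List (List Int)) :
    ∀ (rb : List (String × List (List Int))) (st : Option String × Int × List (List Int)),
    0 ≤ st.2.1 →
    rb.foldl (pvRouteA rc) st = rb.foldl (pvRouteB rc) st := by
  intro rb
  induction rb with
  | nil => intro st _; rfl
  | cons p t ih =>
    intro st hm
    simp only [List.foldl_cons]
    rw [pvRoute_eq rc st p hm]
    exact ih _ (pvRouteB_nonneg rc st p hm)

-- ===== VERDICT (by name: the statement is the Claim_ definition above) =====
theorem contar_coincidencias_spec : Claim_equal_contar_coincidencias := by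
  intro rb rc _
  unfold Spec_contar_coincidencias contar_coincidencias contar_coincidencias_alt
  exact pvOuter_eq rc rb (none, 0, []) (by norm_num)
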